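-- pv_equiv track=rewrite | github.com/yxh139270/model-explorer | src/server/package/src/model_explorer/custom_dialect_parser.py | _find_top_level_token
-- ===== SOURCE A (Python) =====
-- def _find_top_level_token(text: str, token: str) -> int:
--   stack: list[str] = []
--   delimiters = {'(': ')', '[': ']', '{': '}', '<': '>'}
--   index = 0
--   while index < len(text):
--     ch = text[index]
--     if not stack and text.startswith(token, index):
--       return index
--     if ch in delimiters:
--       stack.append(delimiters[ch])
--     elif stack and ch == stack[-1]:
--       stack.pop()
--     index += 1
--   return -1
-- ===== SOURCE B (Python) =====
-- def _find_top_level_token(text: str, token: str) -> int: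
--   top_level: list[bool] = []
--   stack: list[str] = []
--   delimiters = {'(': ')', '[': ']', '{': '}', '<': '>'}
--   for ch in text:
--     top_level.append(not stack)
--     if ch in delimiters:
--       stack.append(delimiters[ch])
--     elif stack and ch == stack[-1]:
--       stack.pop()
--   pos = text.find(token)
--   while pos != -1:
--     if pos < len(top_level) and top_level[pos]:
--       return pos
--     pos = text.find(token, pos + 1)
--   return -1
-- ===== Notes on version B (the rewrite author's own statement) =====
-- stated objective: faster
-- what changed: Instead of testing startswith at every index while walking with the bracket stack, B builds a boolean top-level mask in one pass over the text and then iterates only over the str.find candidate occurrences of the token, returning the first candidate whose position is top-level.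
import Mathlib
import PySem

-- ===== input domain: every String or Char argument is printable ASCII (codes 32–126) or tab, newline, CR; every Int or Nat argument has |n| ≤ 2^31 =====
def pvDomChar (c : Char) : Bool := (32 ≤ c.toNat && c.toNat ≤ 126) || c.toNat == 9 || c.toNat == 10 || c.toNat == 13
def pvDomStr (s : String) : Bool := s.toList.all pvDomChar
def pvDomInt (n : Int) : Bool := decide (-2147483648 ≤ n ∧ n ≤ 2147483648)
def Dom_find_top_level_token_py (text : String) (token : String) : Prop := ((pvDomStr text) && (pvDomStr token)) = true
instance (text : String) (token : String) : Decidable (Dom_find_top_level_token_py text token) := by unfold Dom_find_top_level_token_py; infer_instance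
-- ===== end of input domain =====

-- B replaces A's single walk (startswith test at each index while maintaining the bracket stack)
-- by first building a top-level mask in one pass, then scanning only the str.find candidate
-- occurrences of the token; objective: alternative decomposition, same exact result.

-- ===== PORT A =====
-- the dict {'(' : ')', '[' : ']', '{' : '}', '<' : '>'} as a lookup (membership + value)
def pvDelim (ch : Char) : Option Char :=
  if ch = '(' then some ')'
  else if ch = '[' then some ']'
  else if ch = '{' then some '}'
  else if ch = '<' then some '>'
  else none

-- A's while-loop; the Python list 'stack' is kept top-at-head (append = cons, stack[-1] = head)
def pvALoop (token : List Char) : List Char → List Char → Nat → Int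
  | [], _, _ => -1
  | ch :: rest, stack, index =>
    if stack.isEmpty && PySem.Chars.startswith (ch :: rest) token then (index : Int)
    else
      match pvDelim ch with
      | some c => pvALoop token rest (c :: stack) (index + 1)
      | none =>
        match stack with
        | top :: s' => if ch = top then pvALoop token rest s' (index + 1)
                       else pvALoop token rest (top :: s') (index + 1)
        | [] => pvALoop token rest [] (index + 1)

def find_top_level_token_py (text : String) (token : String) : Int :=
  pvALoop token.toList text.toList [] 0

-- ===== PORT B =====
-- one bracket-stack transition (same rules as A's loop body, factored out)
def pvStep (stack : List Char) (ch : Char) : List Char :=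
  match pvDelim ch with
  | some c => c :: stack
  | none =>
    match stack with
    | top :: s' => if ch = top then s' else top :: s'
    | [] => []

-- Source B's first for-loop: top_level[i] = (stack empty immediately before index i)
def pvMask : List Char → List Char → List Bool
  | _, [] => []
  | stack, ch :: rest => stack.isEmpty :: pvMask (pvStep stack ch) rest

-- Source B's while-loop over text.find(token, start) candidates (fuel bounds the ≤ len+1 iterations)
def pvBLoop (text token : List Char) (mask : List Bool) : Nat → Nat → Int
  | 0, _ => -1
  | fuel + 1, start =>
    let pos := PySem.Chars.findFrom text token (start : Int)
    if pos = -1 then -1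
    else if pos.toNat < mask.length && mask.getD pos.toNat false then pos
    else pvBLoop text token mask fuel (pos.toNat + 1)

def find_top_level_token_py_alt (text : String) (token : String) : Int :=
  let chars := text.toList
  pvBLoop chars token.toList (pvMask [] chars) (chars.length + 2) 0

-- ===== PRECONDITION & SPEC =====
def Spec_find_top_level_token_py (text : String) (token : String) (out : Int) : Prop := out = find_top_level_token_py_alt text token
instance (text : String) (token : String) (out : Int) : Decidable (Spec_find_top_level_token_py text token out) := by unfold Spec_find_top_level_token_py; infer_instance

-- ===== CLAIM (what is proved, stated in full; the proofs are below) =====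
def Claim_equal_find_top_level_token_py : Prop := ∀ (text : String) (token : String), Dom_find_top_level_token_py text token → Spec_find_top_level_token_py text token (find_top_level_token_py text token)

-- ===== LEMMAS AND PROOFS =====

-- reference: 'index i is a hit' — stack empty before i and token starts at i
def pvHit (chars token : List Char) (i : Nat) : Bool :=
  decide (List.foldl pvStep [] (chars.take i) = []) && PySem.Chars.startswith (chars.drop i) token

lemma pvHit_iff (chars token : List Char) (i : Nat) :
    pvHit chars token i = true ↔
      (List.foldl pvStep [] (chars.take i) = [] ∧ token <+: chars.drop i) := by
  simp [pvHit, PySem.Chars.startswith_iff]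

-- reference scan: first hit at index ≥ i, else -1
def pvRef (chars token : List Char) (i : Nat) : Int :=
  if i < chars.length then
    if pvHit chars token i then (i : Int) else pvRef chars token (i + 1)
  else -1
termination_by chars.length - i

lemma pvALoop_cons (token : List Char) (ch : Char) (rest stack : List Char) (index : Nat) :
    pvALoop token (ch :: rest) stack index =
      if stack.isEmpty && PySem.Chars.startswith (ch :: rest) token then (index : Int)
      else pvALoop token rest (pvStep stack ch) (index + 1) := by
  cases stack <;> rcases h : pvDelim ch with _ | c <;>
    (simp [pvALoop, pvStep, h]; try (split_ifs <;> rfl))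

lemma pvALoop_eq_pvRef (chars token : List Char) :
    ∀ (n i : Nat), chars.length - i ≤ n →
      pvALoop token (chars.drop i) (List.foldl pvStep [] (chars.take i)) i = pvRef chars token i := by
  intro n
  induction n with
  | zero =>
    intro i h
    have hi : chars.length ≤ i := by omega
    rw [List.drop_eq_nil_of_le hi]
    rw [pvRef]
    simp [pvALoop, Nat.not_lt.mpr hi]
  | succ n ih =>
    intro i h
    by_cases hi : i < chars.length
    · have hdrop : chars.drop i = chars[i] :: chars.drop (i + 1) :=
        List.drop_eq_getElem_cons hi
      have htake : chars.take (i + 1) = chars.take i ++ [chars[i]] :=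
        (List.take_succ_eq_append_getElem hi)
      rw [hdrop, pvALoop_cons, pvRef, if_pos hi]
      by_cases hh : pvHit chars token i = true
      · rw [if_pos hh]
        obtain ⟨h1, h2⟩ := (pvHit_iff chars token i).mp hh
        rw [if_pos]
        simp only [Bool.and_eq_true, List.isEmpty_iff, PySem.Chars.startswith_iff]
        exact ⟨h1, by rwa [hdrop] at h2⟩
      · rw [if_neg hh, if_neg]
        · have : List.foldl pvStep [] (chars.take (i + 1)) =
              pvStep (List.foldl pvStep [] (chars.take i)) chars[i] := by
            rw [htake, List.foldl_append]; rfl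
          rw [← this]
          exact ih (i + 1) (by omega)
        · simp only [Bool.and_eq_true, List.isEmpty_iff, PySem.Chars.startswith_iff]
          rintro ⟨h1, h2⟩
          exact hh ((pvHit_iff chars token i).mpr ⟨h1, by rw [hdrop]; exact h2⟩)
    · rw [List.drop_eq_nil_of_le (by omega)]
      rw [pvRef]
      simp [pvALoop, hi]

lemma pvMask_length (stack chars : List Char) : (pvMask stack chars).length = chars.length := by
  induction chars generalizing stack with
  | nil => simp [pvMask]
  | cons c cs ih => simp [pvMask, ih]

lemma pvMask_getD (chars : List Char) :
    ∀ (stack : List Char) (i : Nat), i < chars.length →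
      (pvMask stack chars).getD i false = (List.foldl pvStep stack (chars.take i)).isEmpty := by
  induction chars with
  | nil => intro _ i h; simp at h
  | cons c cs ih =>
    intro stack i h
    cases i with
    | zero => simp [pvMask]
    | succ j =>
      simp only [pvMask, List.getD_cons_succ, List.take_succ_cons, List.foldl_cons]
      exact ih (pvStep stack c) j (by simpa using h)

-- a prefix of a later suffix is an infix of an earlier suffix
lemma prefix_drop_infix (token chars : List Char) {a j : Nat} (haj : a ≤ j)
    (h : token <+: chars.drop j) : token <:+: chars.drop a := by
  obtain ⟨t, ht⟩ := h
  refine ⟨(chars.drop a).take (j - a), t, ?_⟩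
  have hdd : (chars.drop a).drop (j - a) = chars.drop j := by
    rw [List.drop_drop]; congr 1; omega
  rw [List.append_assoc, ht, ← hdd, List.take_append_drop]

lemma pvRef_no_hit (chars token : List Char) :
    ∀ (i : Nat), (∀ j, i ≤ j → ¬ token <+: chars.drop j) → pvRef chars token i = -1 := by
  intro i
  induction hn : chars.length - i using Nat.strong_induction_on generalizing i with
  | _ n ih =>
    intro hno
    rw [pvRef]
    by_cases hi : i < chars.length
    · rw [if_pos hi, if_neg]
      · exact ih (chars.length - (i+1)) (by omega) (i+1) rfl
          (fun j hj => hno j (by omega))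
      · intro hcon
        exact hno i le_rfl ((pvHit_iff chars token i).mp hcon).2
    · rw [if_neg hi]

lemma pvRef_skip (chars token : List Char) :
    ∀ (n a b : Nat), b - a ≤ n → a ≤ b → b ≤ chars.length →
      (∀ j, a ≤ j → j < b → ¬ token <+: chars.drop j) → pvRef chars token a = pvRef chars token b := by
  intro n
  induction n with
  | zero =>
    intro a b h hab _ _
    have : a = b := by omega
    rw [this]
  | succ m ihm =>
    intro a b h hab hb hno
    rcases Nat.eq_or_lt_of_le hab with heq | hlt
    · rw [heq]
    · have h1 : pvRef chars token a = pvRef chars token (a + 1) := by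
        rw [pvRef, if_pos (by omega), if_neg]
        intro hcon
        exact hno a le_rfl hlt ((pvHit_iff chars token a).mp hcon).2
      rw [h1]
      exact ihm (a + 1) b (by omega) (by omega) hb (fun j hj hj' => hno j (by omega) hj')

lemma findFrom_past (s sub : List Char) (k : Nat) (h : s.length < k) :
    PySem.Chars.findFrom s sub (k : Int) = -1 := by
  simp only [PySem.Chars.findFrom]
  split_ifs <;> omega

lemma pvBLoop_eq_pvRef (chars token : List Char) :
    ∀ (fuel start : Nat), chars.length + 2 ≤ fuel + start → start ≤ chars.length + 1 →
      pvBLoop chars token (pvMask [] chars) fuel start = pvRef chars token start := by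
  intro fuel
  induction fuel with
  | zero => intro start h1 h2; omega
  | succ f ih =>
    intro start h1 h2
    rw [pvBLoop]
    rcases Nat.lt_or_ge chars.length start with hpast | hle
    · rw [findFrom_past chars token start hpast]
      rw [if_pos rfl, pvRef, if_neg (by omega)]
    · by_cases hneg : PySem.Chars.findFrom chars token (start : Int) = -1
      · rw [if_pos hneg]
        have hnof : ¬ token <:+: chars.drop start :=
          (PySem.Chars.findFrom_natCast_eq_neg_one_iff chars token start hle).mp hneg
        refine (pvRef_no_hit chars token start ?_).symm
        intro j hj hpre
        exact hnof (prefix_drop_infix token chars hj hpre)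
      · rw [if_neg hneg]
        obtain ⟨hge, hpre, hmin⟩ :=
          PySem.Chars.findFrom_natCast_spec chars token start hle hneg
        have hpos0 : (0:Int) ≤ PySem.Chars.findFrom chars token (start : Int) :=
          le_trans (by exact_mod_cast Nat.zero_le start) hge
        obtain ⟨p, hp⟩ : ∃ p : Nat, PySem.Chars.findFrom chars token (start : Int) = (p : Int) :=
          ⟨(PySem.Chars.findFrom chars token (start : Int)).toNat,
            (Int.toNat_of_nonneg hpos0).symm⟩
        rw [hp] at hge hpre hmin ⊢
        simp only [Int.toNat_natCast] at hpre hmin ⊢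
        have hgeN : start ≤ p := by exact_mod_cast hge
        have hposlen : p ≤ chars.length := by
          by_contra hgt
          replace hgt := Nat.lt_of_not_le hgt
          have hdrop : chars.drop p = [] := List.drop_eq_nil_of_le (by omega)
          have htok : token = [] := by
            have h' := hpre; rw [hdrop] at h'; exact List.prefix_nil.mp h'
          exact hmin start le_rfl (by omega) (htok ▸ List.nil_prefix)
        have hskip : pvRef chars token start = pvRef chars token p :=
          pvRef_skip chars token (p - start) start p (by omega) hgeN hposlen
            (fun j hj hj' => hmin j hj hj')
        by_cases hmask : p < (pvMask [] chars).length ∧ (pvMask [] chars).getD p false = true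
        · obtain ⟨hm1, hm2⟩ := hmask
          rw [if_pos (by rw [List.getD_eq_getElem _ _ hm1] at hm2; simp [hm1, hm2])]
          have hlt : p < chars.length := by rwa [pvMask_length] at hm1
          have hemp : List.foldl pvStep [] (chars.take p) = [] := by
            have hg := pvMask_getD chars [] p hlt
            rw [hm2] at hg
            exact List.isEmpty_iff.mp hg.symm
          rw [hskip, pvRef, if_pos hlt, if_pos ((pvHit_iff chars token p).mpr ⟨hemp, hpre⟩)]
        · rw [if_neg (by
            intro hc
            simp only [Bool.and_eq_true, decide_eq_true_eq] at hc
            exact hmask ⟨hc.1, hc.2⟩)]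
          have hnext : pvRef chars token p = pvRef chars token (p + 1) := by
            rcases Nat.lt_or_ge p chars.length with hlt | hge2
            · rw [pvRef, if_pos hlt, if_neg]
              intro hcon
              have hemp := ((pvHit_iff chars token p).mp hcon).1
              apply hmask
              refine ⟨by rwa [pvMask_length], ?_⟩
              rw [pvMask_getD chars [] p hlt, hemp]
              rfl
            · rw [pvRef, if_neg (by omega), pvRef, if_neg (by omega)]
          rw [hskip, hnext]
          exact ih (p + 1) (by omega) (by omega)

-- ===== VERDICT (by name: the statement is the Claim_ definition above) =====
theorem find_top_level_token_py_spec : Claim_equal_find_top_level_token_py := by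
  intro text token _
  unfold Spec_find_top_level_token_py find_top_level_token_py find_top_level_token_py_alt
  have hA := pvALoop_eq_pvRef text.toList token.toList text.toList.length 0 (by omega)
  have hB := pvBLoop_eq_pvRef text.toList token.toList (text.toList.length + 2) 0
    (by omega) (by omega)
  simp only [List.take_zero, List.drop_zero, List.foldl_nil] at hA
  rw [hA, hB]
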